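-- pv_equiv track=rewrite | github.com/adumlouie/323-SyntaxAnalyzer-A2 | lexer.py | isInt
-- ===== SOURCE A (Python) =====
-- def isInt(input):
--     transition = {
--         "A": "B",
--         "B": "B"
--     }
--
--     legal_digits = set("0123456789")
--     accepting = "B"
--     # setting current to starting state
--     current = 'A'
--     for ch in input:
--         if ch in legal_digits:
--             current = transition[current]
--         else:
--             return False
--     if current == accepting:
--         return True
--     else:
--         return False
-- ===== SOURCE B (Python) =====
-- def isInt(input):
--     return len(input) > 0 and set(input) <= set("0123456789")
-- ===== Notes on version B (the rewrite author's own statement) =====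
-- stated objective: simpler
-- what changed: Replaces the transition-dict DFA scan with early return by a non-empty guard plus a subset test of the input's distinct characters against the digit set.
import Mathlib
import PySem

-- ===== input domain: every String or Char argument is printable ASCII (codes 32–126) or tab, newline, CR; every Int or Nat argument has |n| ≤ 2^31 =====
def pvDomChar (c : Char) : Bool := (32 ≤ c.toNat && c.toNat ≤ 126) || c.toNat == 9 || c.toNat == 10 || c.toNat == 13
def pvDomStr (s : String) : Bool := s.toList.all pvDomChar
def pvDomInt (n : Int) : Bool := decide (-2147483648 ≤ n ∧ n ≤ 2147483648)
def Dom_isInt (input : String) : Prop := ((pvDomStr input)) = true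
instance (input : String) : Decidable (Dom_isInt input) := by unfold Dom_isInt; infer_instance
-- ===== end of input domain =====

-- B replaces A's transition-dict DFA scan by a non-empty guard plus a subset test of distinct input chars against the digit set (simpler, same cost).


-- ===== PORT A =====
-- the transition dict {"A": "B", "B": "B"}
def isIntTransition : PySem.Dict String String :=
  (PySem.Dict.empty.insert "A" "B").insert "B" "B"

def isIntDigits : PySem.Set Char := PySem.Set.ofList "0123456789".toList

-- the for-loop: none = the early 'return False'; some cur = fell through with state cur.
-- transition[current] is ported with getD "": current is always a key, so the KeyError branch is unreachable.
def isIntLoop (current : String) : List Char → Option String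
  | [] => some current
  | ch :: rest =>
    if isIntDigits.contains ch then
      isIntLoop (isIntTransition.getD current "") rest
    else
      none

def isInt (input : String) : Bool :=
  match isIntLoop "A" input.toList with
  | none => false
  | some current => if current == "B" then true else false

-- ===== PORT B =====
def isInt_alt (input : String) : Bool :=
  decide (PySem.Str.len input > 0) &&
    PySem.Set.issubset (PySem.Set.ofList input.toList) (PySem.Set.ofList "0123456789".toList)

-- ===== PRECONDITION & SPEC =====
def Spec_isInt (input : String) (out : Bool) : Prop := out = isInt_alt input
instance (input : String) (out : Bool) : Decidable (Spec_isInt input out) := by unfold Spec_isInt; infer_instance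

-- ===== CLAIM (what is proved, stated in full; the proofs are below) =====
def Claim_equal_isInt : Prop := ∀ (input : String), Dom_isInt input → Spec_isInt input (isInt input)

-- ===== LEMMAS AND PROOFS =====
theorem isIntLoop_B (l : List Char) :
    isIntLoop "B" l = if l.all (fun c => isIntDigits.contains c) then some "B" else none := by
  induction l with
  | nil => simp [isIntLoop]
  | cons c rest ih =>
    by_cases h : c ∈ isIntDigits
    · simp [isIntLoop, h, isIntTransition, PySem.Dict.getD, ih, List.all_cons,
        PySem.Set.contains_iff]
    · simp [isIntLoop, h, List.all_cons]

theorem isInt_eq (input : String) :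
    isInt input = (!input.toList.isEmpty && input.toList.all (fun c => isIntDigits.contains c)) := by
  unfold isInt
  cases hl : input.toList with
  | nil => simp [isIntLoop]
  | cons c rest =>
    by_cases h : c ∈ isIntDigits
    · have hg : isIntTransition.getD "A" "" = "B" := by decide
      simp only [isIntLoop, PySem.Set.contains_iff]
      rw [if_pos h, hg, isIntLoop_B]
      by_cases h2 : (rest.all fun c => isIntDigits.contains c) = true
      · rw [if_pos h2]
        simp only [List.all_eq_true, PySem.Set.contains_iff] at h2
        simp [h, PySem.Set.contains_iff]
        exact h2
      · rw [if_neg h2]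
        simp only [List.all_eq_true, PySem.Set.contains_iff] at h2
        push_neg at h2
        simp [h, PySem.Set.contains_iff]
        exact h2
    · simp [isIntLoop, h]

theorem issubset_all (l : List Char) :
    PySem.Set.issubset (PySem.Set.ofList l) (PySem.Set.ofList "0123456789".toList)
      = l.all (fun ch => isIntDigits.contains ch) := by
  rw [Bool.eq_iff_iff, PySem.Set.issubset_iff, List.all_eq_true]
  simp only [PySem.Set.contains_iff, PySem.Set.mem_ofList, isIntDigits]

-- ===== VERDICT (by name: the statement is the Claim_ definition above) =====
theorem isInt_spec : Claim_equal_isInt := by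
  intro input _
  unfold Spec_isInt isInt_alt
  rw [isInt_eq, ← issubset_all input.toList]
  cases hl : input.toList with
  | nil =>
    simp [PySem.Str.len, hl]
  | cons c rest =>
    simp [PySem.Str.len, hl]
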